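-- pv_equiv track=rewrite | github.com/Noor-Nasri/daily-leetcode | 2588-maximum-number-of-points-from-grid-queries/maximum-number-of-points-from-grid-queries.py | solveDistsInGrid
-- ===== SOURCE A (Python) =====
-- from heapq import heappop, heappush
--
-- def solveDistsInGrid(grid):
--     n_row, n_col = len(grid), len(grid[0])
--     distances = [[0 for i in range(n_col)] for row in range(n_row)]
--     directions = [
--         (1, 0), (-1, 0), (0, 1), (0, -1)
--     ]
--     options = [
--         (grid[0][0] + 1, 0, 0)
--     ]
--
--     maxVal = 0
--
--     while options:
--         minDist, row, col = heappop(options)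
--         if distances[row][col] > 0:
--             continue
--         distances[row][col] = minDist
--         maxVal = max(maxVal, minDist)
--
--         for dr, dc in directions:
--             nr, nc = row + dr, col + dc
--             if not (0 <= nr < n_row and 0 <= nc < n_col):
--                 continue
--             if distances[nr][nc] > 0:
--                 continue
--
--             heappush(options, (
--                 max(minDist, grid[nr][nc] + 1),
--                 nr,
--                 nc
--             ))
--     return distances, maxVal
-- ===== SOURCE B (Python) =====
-- def candidate(grid, distances, n_row, n_col, r, c):
--     if distances[r][c] > 0:
--         return None
--     near = [distances[ar][ac]
--             for ar, ac in ((r - 1, c), (r + 1, c), (r, c - 1), (r, c + 1))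
--             if 0 <= ar < n_row and 0 <= ac < n_col and distances[ar][ac] > 0]
--     if not near:
--         return None
--     return (max(min(near), grid[r][c] + 1), r, c)
--
-- def solveDistsInGrid(grid):
--     # Prim-style growth: seed the origin, then repeatedly scan the whole grid
--     # for the cheapest fringe cell and attach it; no heap, no frontier state.
--     n_row, n_col = len(grid), len(grid[0])
--     distances = [[0] * n_col for _ in range(n_row)]
--     distances[0][0] = grid[0][0] + 1
--     maxVal = grid[0][0] + 1
--     for _ in range(n_row * n_col - 1):
--         best = None
--         for r in range(n_row):
--             for c in range(n_col):
--                 t = candidate(grid, distances, n_row, n_col, r, c)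
--                 if t is not None and (best is None or t[0] < best[0]):
--                     best = t
--         if best is None:
--             break
--         key, r, c = best
--         distances[r][c] = key
--         maxVal = max(maxVal, key)
--     return distances, maxVal
-- ===== Notes on version B (the rewrite author's own statement) =====
-- stated objective: alternative
-- what changed: A runs lazy-deletion heap Dijkstra (heappush/heappop with stale entries skipped via the distances>0 test); B keeps no auxiliary structure at all: it seeds the origin and then, Prim-style, repeatedly scans the whole grid for the cheapest unassigned cell adjacent to the assigned region (key = max(min assigned-neighbor distance, value+1)) and assigns it, trading the heap for repeated full-grid scans.
-- outside the precondition, e.g. on solveDistsInGrid([[-2, 0]]): A returns ([[1, 1]], 1), B returns ([[-1, 0]], -1)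
import Mathlib
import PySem

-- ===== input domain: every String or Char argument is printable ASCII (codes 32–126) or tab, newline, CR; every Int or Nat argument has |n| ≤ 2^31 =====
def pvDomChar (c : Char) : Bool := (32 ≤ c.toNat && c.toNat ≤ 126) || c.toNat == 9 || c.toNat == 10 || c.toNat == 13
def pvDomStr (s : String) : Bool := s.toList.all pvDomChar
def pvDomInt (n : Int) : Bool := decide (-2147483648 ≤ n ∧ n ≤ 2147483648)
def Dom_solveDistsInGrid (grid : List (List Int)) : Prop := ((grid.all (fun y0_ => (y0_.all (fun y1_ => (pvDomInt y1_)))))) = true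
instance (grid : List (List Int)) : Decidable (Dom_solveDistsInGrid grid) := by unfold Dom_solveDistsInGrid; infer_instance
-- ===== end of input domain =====

-- B replaces A's lazy-deletion heap Dijkstra by Prim-style growth with no auxiliary
-- structure: seed the origin, then repeatedly scan the whole grid for the cheapest
-- unassigned cell adjacent to the assigned region and attach it; same results.

-- ===== PORT A =====
-- xss[r][c] for 0 ≤ r < len xss, 0 ≤ c < len (xss[r]) — the only way A and B index (bounds are checked first); exact there.
def pvGet2 (xss : List (List Int)) (r c : Int) : Int :=
  (xss.getD r.toNat []).getD c.toNat 0

-- xss[r][c] = v under the same in-bounds discipline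
def pvSet2 (xss : List (List Int)) (r c : Int) (v : Int) : List (List Int) :=
  xss.set r.toNat ((xss.getD r.toNat []).set c.toNat v)

-- Python's `<` on (int, int, int) tuples (heap entries)
def pvLexLt (a b : Int × Int × Int) : Bool :=
  decide (a.1 < b.1) || (a.1 == b.1 && (decide (a.2.1 < b.2.1) || (a.2.1 == b.2.1 && decide (a.2.2 < b.2.2))))

-- first minimal element w.r.t. lt of x :: xs (what heappop returns)
def pvFoldMin {T : Type} (lt : T → T → Bool) (x : T) (xs : List T) : T :=
  xs.foldl (fun m y => if lt y m then y else m) x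

def pvEraseFirst : List (Int × Int × Int) → (Int × Int × Int) → List (Int × Int × Int)
  | [], _ => []
  | y :: ys, v => if y = v then ys else y :: pvEraseFirst ys v

def pvDirs : List (Int × Int) := [(1, 0), (-1, 0), (0, 1), (0, -1)]

-- body of A's `for dr, dc in directions` loop (guards, then heappush = append)
def pvPushA (grid : List (List Int)) (nrow ncol d r c : Int) (dist : List (List Int))
    (h : List (Int × Int × Int)) (dir : Int × Int) : List (Int × Int × Int) :=
  let nr := r + dir.1
  let nc := c + dir.2
  if 0 ≤ nr ∧ nr < nrow ∧ 0 ≤ nc ∧ nc < ncol then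
    if pvGet2 dist nr nc > 0 then h
    else h ++ [(max d (pvGet2 grid nr nc + 1), nr, nc)]
  else h

-- A's while-loop; the heap is kept as the list of live entries, heappop = remove the
-- least tuple (exactly heapq's result).  Fuel only guards termination (Lean totality);
-- it is never exhausted under Pre_ (proved as part of the simulation).
def pvLoopA (grid : List (List Int)) (nrow ncol : Int) :
    Nat → List (Int × Int × Int) → List (List Int) → Int → List (List Int) × Int
  | 0, _, dist, mv => (dist, mv)
  | fuel + 1, options, dist, mv =>
    match options with
    | [] => (dist, mv)
    | x :: xs =>
      let m := pvFoldMin pvLexLt x xs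
      let rest := pvEraseFirst (x :: xs) m
      if pvGet2 dist m.2.1 m.2.2 > 0 then pvLoopA grid nrow ncol fuel rest dist mv
      else
        let dist' := pvSet2 dist m.2.1 m.2.2 m.1
        pvLoopA grid nrow ncol fuel
          (pvDirs.foldl (pvPushA grid nrow ncol m.1 m.2.1 m.2.2 dist') rest)
          dist' (max mv m.1)

def solveDistsInGrid (grid : List (List Int)) : List (List Int) × Int :=
  let nrow : Int := grid.length
  let ncol : Int := ((PySem.List.pyGetD grid 0 []).length : Int)
  let dist0 : List (List Int) :=
    (List.range nrow.toNat).map (fun _ => (List.range ncol.toNat).map (fun _ => (0 : Int)))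
  pvLoopA grid nrow ncol (1 + 5 * (nrow.toNat * ncol.toNat))
    [(pvGet2 grid 0 0 + 1, 0, 0)] dist0 0

-- ===== PORT B =====
-- the `near` comprehension of Source B's `candidate`: distances of assigned in-bounds neighbours
def pvNear (nrow ncol r c : Int) (dist : List (List Int)) : List Int :=
  [(r - 1, c), (r + 1, c), (r, c - 1), (r, c + 1)].filterMap (fun p =>
    if 0 ≤ p.1 ∧ p.1 < nrow ∧ 0 ≤ p.2 ∧ p.2 < ncol ∧ pvGet2 dist p.1 p.2 > 0 then
      some (pvGet2 dist p.1 p.2)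
    else none)

-- Source B's `candidate`: None unless (r, c) is an unassigned fringe cell; else its key tuple
def pvCand? (grid dist : List (List Int)) (nrow ncol r c : Int) : Option (Int × Int × Int) :=
  if pvGet2 dist r c > 0 then none
  else
    match pvNear nrow ncol r c dist with
    | [] => none
    | x :: xs => some (max (xs.foldl min x) (pvGet2 grid r c + 1), r, c)

-- Source B's `if t is not None and (best is None or t[0] < best[0]): best = t`
def pvPick (grid dist : List (List Int)) (nrow ncol : Int)
    (acc : Option (Int × Int × Int)) (p : Nat × Nat) : Option (Int × Int × Int) :=
  match pvCand? grid dist nrow ncol (p.1 : Int) (p.2 : Int) with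
  | none => acc
  | some t =>
    match acc with
    | none => some t
    | some b => if t.1 < b.1 then some t else acc

-- Source B's double scan `for r in range(n_row): for c in range(n_col): …`
def pvScan (grid dist : List (List Int)) (nrow ncol : Int) : Option (Int × Int × Int) :=
  (List.range nrow.toNat).foldl (fun acc r =>
    (List.range ncol.toNat).foldl (fun acc c => pvPick grid dist nrow ncol acc (r, c)) acc) none

-- Source B's outer `for _ in range(n_row * n_col - 1)` with its `break`
def pvLoopAlt (grid : List (List Int)) (nrow ncol : Int) :
    Nat → List (List Int) → Int → List (List Int) × Int
  | 0, dist, mv => (dist, mv)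
  | fuel + 1, dist, mv =>
    match pvScan grid dist nrow ncol with
    | none => (dist, mv)
    | some t => pvLoopAlt grid nrow ncol fuel (pvSet2 dist t.2.1 t.2.2 t.1) (max mv t.1)

def solveDistsInGrid_alt (grid : List (List Int)) : List (List Int) × Int :=
  let nrow : Int := grid.length
  let ncol : Int := ((PySem.List.pyGetD grid 0 []).length : Int)
  let dist0 : List (List Int) :=
    pvSet2 ((List.range nrow.toNat).map (fun _ => List.replicate ncol.toNat (0 : Int)))
      0 0 (pvGet2 grid 0 0 + 1)
  pvLoopAlt grid nrow ncol (nrow.toNat * ncol.toNat - 1) dist0 (pvGet2 grid 0 0 + 1)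

-- ===== PRECONDITION & SPEC =====
-- Pre_ excludes inputs where A raises (empty grid, empty first row, or a row shorter
-- than row 0: IndexError once the flood fill reaches it) and grids whose top-left
-- value is negative, where A's `distances[r][c] > 0` visited-test breaks down (its
-- 0-sentinel collides with real distances ≤ 0 and A re-pops cells forever on all but
-- degenerate such grids).
def Pre_solveDistsInGrid (grid : List (List Int)) : Prop :=
  grid ≠ [] ∧ 0 < (grid.headD []).length ∧
  (∀ row ∈ grid, (grid.headD []).length ≤ row.length) ∧
  0 ≤ (grid.headD []).headD 0

instance (grid : List (List Int)) : Decidable (Pre_solveDistsInGrid grid) := by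
  unfold Pre_solveDistsInGrid; infer_instance

def pvWitness_solveDistsInGrid : List (List Int) := [[1, 2, 3], [2, 0, 1]]

def Spec_solveDistsInGrid (grid : List (List Int)) (out : List (List Int) × Int) : Prop :=
  out = solveDistsInGrid_alt grid
instance (grid : List (List Int)) (out : List (List Int) × Int) :
    Decidable (Spec_solveDistsInGrid grid out) := by unfold Spec_solveDistsInGrid; infer_instance

-- ===== CLAIM (what is proved, stated in full; the proofs are below) =====
def Claim_equal_solveDistsInGrid : Prop :=
  ∀ (grid : List (List Int)), Dom_solveDistsInGrid grid → Pre_solveDistsInGrid grid →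
    Spec_solveDistsInGrid grid (solveDistsInGrid grid)

-- ===== LEMMAS AND PROOFS =====

-- cell (r, c) is inside the n_row × n_col board
def pvInb (nrow ncol r c : Int) : Prop := 0 ≤ r ∧ r < nrow ∧ 0 ≤ c ∧ c < ncol

-- dist is an n_row × n_col matrix
def pvShape (nrow ncol : Int) (dist : List (List Int)) : Prop :=
  dist.length = nrow.toNat ∧ ∀ row ∈ dist, row.length = ncol.toNat

-- every stored distance is 0 (unassigned) or ≥ 1 (assigned)
def pvVals (nrow ncol : Int) (dist : List (List Int)) : Prop :=
  ∀ r c, pvInb nrow ncol r c → pvGet2 dist r c = 0 ∨ 1 ≤ pvGet2 dist r c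

-- u is an orthogonal neighbour of v
def pvAdj (u v : Int × Int) : Prop :=
  (u.1 = v.1 + 1 ∧ u.2 = v.2) ∨ (u.1 = v.1 - 1 ∧ u.2 = v.2) ∨
  (u.1 = v.1 ∧ u.2 = v.2 + 1) ∨ (u.1 = v.1 ∧ u.2 = v.2 - 1)

-- the simulation invariant, relating A's heap H to the distance matrix alone:
-- (1) every live entry sits at an in-bounds cell, has key ≥ 1, and (unless its cell is
--     already assigned) is dominated below by a relaxation through some assigned neighbour;
-- (2) for every unassigned cell and every assigned in-bounds neighbour u of it, the exact
--     relaxation tuple through u is in the heap.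
def pvInv (nrow ncol : Int) (grid : List (List Int)) (H : List (Int × Int × Int))
    (dist : List (List Int)) : Prop :=
  (∀ e ∈ H, pvInb nrow ncol e.2.1 e.2.2 ∧ 1 ≤ e.1 ∧
     (1 ≤ pvGet2 dist e.2.1 e.2.2 ∨
      ∃ u : Int × Int, pvAdj u (e.2.1, e.2.2) ∧ pvInb nrow ncol u.1 u.2 ∧
        1 ≤ pvGet2 dist u.1 u.2 ∧
        max (pvGet2 dist u.1 u.2) (pvGet2 grid e.2.1 e.2.2 + 1) ≤ e.1)) ∧
  (∀ v : Int × Int, pvInb nrow ncol v.1 v.2 → pvGet2 dist v.1 v.2 = 0 →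
     ∀ u : Int × Int, pvAdj u v → pvInb nrow ncol u.1 u.2 → 1 ≤ pvGet2 dist u.1 u.2 →
       (max (pvGet2 dist u.1 u.2) (pvGet2 grid v.1 v.2 + 1), v.1, v.2) ∈ H)

-- number of unassigned cells (the termination measure's main part)
def pvUc (nrow ncol : Int) (dist : List (List Int)) : Nat :=
  ((PySem.List.pyRange 0 nrow 1) ×ˢ (PySem.List.pyRange 0 ncol 1)).countP
    (fun p => pvGet2 dist p.1 p.2 == 0)

lemma pvLexLt_iff (a b : Int × Int × Int) :
    pvLexLt a b = true ↔
      (a.1 < b.1 ∨ (a.1 = b.1 ∧ (a.2.1 < b.2.1 ∨ (a.2.1 = b.2.1 ∧ a.2.2 < b.2.2)))) := by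
  simp [pvLexLt]

lemma pvLexLt_trans {a b c : Int × Int × Int}
    (h1 : pvLexLt a b = true) (h2 : pvLexLt b c = true) : pvLexLt a c = true := by
  rw [pvLexLt_iff] at h1 h2 ⊢; omega

lemma pvLexLt_irrefl (a : Int × Int × Int) : pvLexLt a a = false := by
  rw [← Bool.not_eq_true, pvLexLt_iff]; omega

lemma pvLexLt_compat {a b c : Int × Int × Int}
    (h1 : pvLexLt b c = true) (h2 : pvLexLt b a = false) : pvLexLt a c = true := by
  rw [← Bool.not_eq_true, pvLexLt_iff] at h2; rw [pvLexLt_iff] at h1 ⊢; omega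

lemma pvLexLt_antisymm {a b : Int × Int × Int}
    (h1 : pvLexLt a b = false) (h2 : pvLexLt b a = false) : a = b := by
  obtain ⟨a1, a2, a3⟩ := a; obtain ⟨b1, b2, b3⟩ := b
  rw [← Bool.not_eq_true, pvLexLt_iff] at h1 h2
  simp only [Prod.mk.injEq] at *
  omega

lemma pvFoldMin_cons {T : Type} (lt : T → T → Bool) (x z : T) (zs : List T) :
    pvFoldMin lt x (z :: zs) = pvFoldMin lt (if lt z x then z else x) zs := rfl

lemma pvFoldMin_mem {T : Type} (lt : T → T → Bool) :
    ∀ (xs : List T) (x : T), pvFoldMin lt x xs ∈ x :: xs := by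
  intro xs
  induction xs with
  | nil => intro x; simp [pvFoldMin]
  | cons z zs ih =>
    intro x
    rw [pvFoldMin_cons]
    rcases List.mem_cons.mp (ih (if lt z x then z else x)) with h | h
    · rw [h]; split <;> simp
    · simp [h]

lemma pvFoldMin_not_lt {T : Type} (lt : T → T → Bool)
    (htrans : ∀ a b c, lt a b = true → lt b c = true → lt a c = true)
    (hcompat : ∀ a b c, lt b c = true → lt b a = false → lt a c = true)
    (hirr : ∀ a, lt a a = false) :
    ∀ (xs : List T) (x : T), ∀ y ∈ x :: xs, lt y (pvFoldMin lt x xs) = false := by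
  intro xs
  induction xs with
  | nil => intro x y hy; simp at hy; subst hy; simp [pvFoldMin, hirr]
  | cons z zs ih =>
    intro x y hy
    rw [pvFoldMin_cons]
    by_cases hz : lt z x = true
    · rw [if_pos hz]
      rcases List.mem_cons.mp hy with rfl | hy'
      · cases hxm : lt y (pvFoldMin lt z zs) with
        | false => rfl
        | true =>
          have hzz : lt z (pvFoldMin lt z zs) = true := htrans z y _ hz hxm
          rw [ih z z (by simp)] at hzz; simp at hzz
      · exact ih z y hy'
    · have hz' : lt z x = false := by simpa using hz
      rw [if_neg hz]
      rcases List.mem_cons.mp hy with rfl | hy'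
      · exact ih y y (by simp)
      · rcases List.mem_cons.mp hy' with rfl | hy2
        · cases hzm : lt y (pvFoldMin lt x zs) with
          | false => rfl
          | true =>
            have hxx : lt x (pvFoldMin lt x zs) = true := hcompat x y _ hzm hz'
            rw [ih x x (by simp)] at hxx; simp at hxx
        · exact ih x y (by simp [hy2])

lemma pvLexLt_min (x : Int × Int × Int) (xs : List (Int × Int × Int)) :
    ∀ y ∈ x :: xs, pvLexLt y (pvFoldMin pvLexLt x xs) = false :=
  pvFoldMin_not_lt pvLexLt (fun _ _ _ => pvLexLt_trans) (fun _ _ _ => pvLexLt_compat)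
    pvLexLt_irrefl xs x

lemma pvEraseFirst_subset {l : List (Int × Int × Int)} {v a : Int × Int × Int}
    (h : a ∈ pvEraseFirst l v) : a ∈ l := by
  induction l with
  | nil => simp [pvEraseFirst] at h
  | cons y ys ih =>
    by_cases hy : y = v
    · simp [pvEraseFirst, hy] at h; simp [h]
    · simp only [pvEraseFirst, if_neg hy] at h
      rcases List.mem_cons.mp h with rfl | h'
      · simp
      · simp [ih h']

lemma pvEraseFirst_mem_of_ne {l : List (Int × Int × Int)} {v a : Int × Int × Int}
    (ha : a ∈ l) (hne : a ≠ v) : a ∈ pvEraseFirst l v := by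
  induction l with
  | nil => simp at ha
  | cons y ys ih =>
    by_cases hy : y = v
    · simp only [pvEraseFirst, if_pos hy]
      rcases List.mem_cons.mp ha with rfl | h'
      · exact absurd hy hne
      · exact h'
    · simp only [pvEraseFirst, if_neg hy]
      rcases List.mem_cons.mp ha with rfl | h'
      · simp
      · simp [ih h']

lemma pvEraseFirst_length {l : List (Int × Int × Int)} {v : Int × Int × Int}
    (h : v ∈ l) : (pvEraseFirst l v).length + 1 = l.length := by
  induction l with
  | nil => simp at h
  | cons y ys ih =>
    by_cases hy : y = v
    · simp [pvEraseFirst, hy]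
    · rcases List.mem_cons.mp h with rfl | h'
      · exact absurd rfl hy
      · simp [pvEraseFirst, if_neg hy, ih h']

lemma pvGet2_set2_self {nrow ncol : Int} {dist : List (List Int)} {r c v : Int}
    (hsh : pvShape nrow ncol dist) (hin : pvInb nrow ncol r c) :
    pvGet2 (pvSet2 dist r c v) r c = v := by
  obtain ⟨hlen, hrows⟩ := hsh
  obtain ⟨hr0, hr1, hc0, hc1⟩ := hin
  have hr : r.toNat < dist.length := by omega
  have hsome : dist[r.toNat]? = some dist[r.toNat] := List.getElem?_eq_getElem hr
  have hrowlen : dist[r.toNat].length = ncol.toNat := hrows _ (List.getElem_mem hr)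
  have hc : c.toNat < dist[r.toNat].length := by omega
  simp [pvGet2, pvSet2, List.getD_eq_getElem?_getD, hr, hc]

lemma pvGet2_set2_ne {nrow ncol : Int} {dist : List (List Int)} {r c v r' c' : Int}
    (hsh : pvShape nrow ncol dist) (hin : pvInb nrow ncol r c) (hin' : pvInb nrow ncol r' c')
    (hne : ¬ (r' = r ∧ c' = c)) :
    pvGet2 (pvSet2 dist r c v) r' c' = pvGet2 dist r' c' := by
  obtain ⟨hlen, hrows⟩ := hsh
  obtain ⟨hr0, hr1, hc0, hc1⟩ := hin
  obtain ⟨hr0', hr1', hc0', hc1'⟩ := hin'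
  by_cases hr : r'.toNat = r.toNat
  · have hrr : r' = r := by omega
    subst hrr
    have hcc : ¬ (c.toNat = c'.toNat) := by omega
    have hrlt : r'.toNat < dist.length := by omega
    have hsome : dist[r'.toNat]? = some dist[r'.toNat] := List.getElem?_eq_getElem hrlt
    simp [pvGet2, pvSet2, List.getD_eq_getElem?_getD, hrlt, hcc]
  · have hne2 : ¬ (r.toNat = r'.toNat) := fun hh => hr hh.symm
    simp [pvGet2, pvSet2, List.getD_eq_getElem?_getD, hne2]

lemma pvShape_set2 {nrow ncol : Int} {dist : List (List Int)} {r c v : Int}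
    (hsh : pvShape nrow ncol dist) (hin : pvInb nrow ncol r c) :
    pvShape nrow ncol (pvSet2 dist r c v) := by
  obtain ⟨hlen, hrows⟩ := hsh
  obtain ⟨hr0, hr1, hc0, hc1⟩ := hin
  constructor
  · simp [pvSet2, hlen]
  · intro row hrow
    rcases List.mem_or_eq_of_mem_set hrow with h | rfl
    · exact hrows _ h
    · have hr : r.toNat < dist.length := by omega
      rw [List.length_set, List.getD_eq_getElem dist [] hr]
      exact hrows _ (List.getElem_mem hr)

lemma pvVals_set2 {nrow ncol : Int} {dist : List (List Int)} {r c v : Int}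
    (hsh : pvShape nrow ncol dist) (hv : pvVals nrow ncol dist) (hin : pvInb nrow ncol r c)
    (hd : 1 ≤ v) : pvVals nrow ncol (pvSet2 dist r c v) := by
  intro r' c' hin'
  by_cases h : r' = r ∧ c' = c
  · obtain ⟨rfl, rfl⟩ := h
    rw [pvGet2_set2_self hsh hin]; right; exact hd
  · rw [pvGet2_set2_ne hsh hin hin' h]; exact hv _ _ hin'

lemma pv_countP_update {α : Type} [DecidableEq α] :
    ∀ (l : List α), l.Nodup → ∀ a ∈ l, ∀ (f g : α → Bool), f a = true → g a = false →
      (∀ b ∈ l, b ≠ a → f b = g b) → l.countP g + 1 = l.countP f := by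
  intro l
  induction l with
  | nil => intro _ a ha; simp at ha
  | cons x xs ih =>
    intro hnd a ha f g hfa hga hother
    have hnd' := hnd.of_cons
    have hx : x ∉ xs := (List.nodup_cons.mp hnd).1
    rcases List.mem_cons.mp ha with rfl | ha'
    · have hcong : xs.countP f = xs.countP g :=
        List.countP_congr (fun b hb => by
          rw [hother b (List.mem_cons_of_mem _ hb) (fun h => hx (h ▸ hb))])
      simp [hfa, hga, hcong]
    · have hax : x ≠ a := fun h => hx (h ▸ ha')
      have hfg : f x = g x := hother x (by simp) hax
      have := ih hnd' a ha' f g hfa hga (fun b hb hba => hother b (List.mem_cons_of_mem _ hb) hba)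
      simp only [List.countP_cons, ← hfg]
      cases hfx : f x <;> simp <;> omega

lemma pv_mem_cells {nrow ncol r c : Int} :
    (r, c) ∈ (PySem.List.pyRange 0 nrow 1) ×ˢ (PySem.List.pyRange 0 ncol 1) ↔
      pvInb nrow ncol r c := by
  rw [List.mem_product, PySem.List.mem_pyRange_one, PySem.List.mem_pyRange_one]
  unfold pvInb
  omega

lemma pvUc_set2 {nrow ncol : Int} {dist : List (List Int)} {r c v : Int}
    (hsh : pvShape nrow ncol dist) (hin : pvInb nrow ncol r c)
    (h0 : pvGet2 dist r c = 0) (hd : 1 ≤ v) :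
    pvUc nrow ncol (pvSet2 dist r c v) + 1 = pvUc nrow ncol dist := by
  unfold pvUc
  apply pv_countP_update _ (List.Nodup.product (PySem.List.nodup_pyRange_one 0 nrow)
    (PySem.List.nodup_pyRange_one 0 ncol)) (r, c) (pv_mem_cells.mpr hin)
  · simp [h0]
  · rw [pvGet2_set2_self hsh hin]; simp; omega
  · intro b hb hne
    have hinb : pvInb nrow ncol b.1 b.2 := pv_mem_cells.mp (by
      obtain ⟨b1, b2⟩ := b; exact hb)
    rw [pvGet2_set2_ne hsh hin hinb (fun h => hne (by
      obtain ⟨b1, b2⟩ := b; simp only at h; simp [h.1, h.2]))]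

lemma pvUc_pos {nrow ncol : Int} {dist : List (List Int)} {r c : Int}
    (hin : pvInb nrow ncol r c) (h0 : pvGet2 dist r c = 0) :
    1 ≤ pvUc nrow ncol dist := by
  have hm : ((r, c) : Int × Int) ∈ (PySem.List.pyRange 0 nrow 1) ×ˢ (PySem.List.pyRange 0 ncol 1) :=
    pv_mem_cells.mpr hin
  unfold pvUc
  exact List.countP_pos_iff.mpr ⟨(r, c), hm, by show (pvGet2 dist r c == 0) = true; simp [h0]⟩

-- ===== branch-free form of A's push and its closure properties =====
lemma pvPushA_eq (grid : List (List Int)) (nrow ncol d r c : Int) (dist : List (List Int))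
    (h : List (Int × Int × Int)) (dir : Int × Int) :
    pvPushA grid nrow ncol d r c dist h dir =
      if 0 ≤ r + dir.1 ∧ r + dir.1 < nrow ∧ 0 ≤ c + dir.2 ∧ c + dir.2 < ncol then
        if pvGet2 dist (r + dir.1) (c + dir.2) > 0 then h
        else h ++ [(max d (pvGet2 grid (r + dir.1) (c + dir.2) + 1), r + dir.1, c + dir.2)]
      else h := rfl

lemma pvPushA_length_le (grid : List (List Int)) (nrow ncol d r c : Int)
    (dist : List (List Int)) (h : List (Int × Int × Int)) (dir : Int × Int) :
    (pvPushA grid nrow ncol d r c dist h dir).length ≤ h.length + 1 := by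
  rw [pvPushA_eq]
  split
  · split <;> simp
  · simp

lemma pvFoldPush_length_le (grid : List (List Int)) (nrow ncol d r c : Int)
    (dist : List (List Int)) :
    ∀ (dirs : List (Int × Int)) (h : List (Int × Int × Int)),
      (dirs.foldl (pvPushA grid nrow ncol d r c dist) h).length ≤ h.length + dirs.length := by
  intro dirs
  induction dirs with
  | nil => simp
  | cons dir dirs ih =>
    intro h
    have h1 := ih (pvPushA grid nrow ncol d r c dist h dir)
    have h2 := pvPushA_length_le grid nrow ncol d r c dist h dir
    simp only [List.foldl_cons, List.length_cons]
    omega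

lemma pvPushA_mono {grid : List (List Int)} {nrow ncol d r c : Int} {dist : List (List Int)}
    {h : List (Int × Int × Int)} {dir : Int × Int} {a : Int × Int × Int} (ha : a ∈ h) :
    a ∈ pvPushA grid nrow ncol d r c dist h dir := by
  rw [pvPushA_eq]
  split
  · split
    · exact ha
    · exact List.mem_append.mpr (Or.inl ha)
  · exact ha

lemma pvFoldPush_mono {grid : List (List Int)} {nrow ncol d r c : Int} {dist : List (List Int)} :
    ∀ {dirs : List (Int × Int)} {h : List (Int × Int × Int)} {a : Int × Int × Int}, a ∈ h →
      a ∈ dirs.foldl (pvPushA grid nrow ncol d r c dist) h := by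
  intro dirs
  induction dirs with
  | nil => intro h a ha; exact ha
  | cons dir dirs ih => intro h a ha; exact ih (pvPushA_mono ha)

lemma pvFoldPush_sub {grid : List (List Int)} {nrow ncol d r c : Int} {dist : List (List Int)} :
    ∀ {dirs : List (Int × Int)} {h : List (Int × Int × Int)} {a : Int × Int × Int},
      a ∈ dirs.foldl (pvPushA grid nrow ncol d r c dist) h →
      a ∈ h ∨ ∃ dir ∈ dirs,
        (0 ≤ r + dir.1 ∧ r + dir.1 < nrow ∧ 0 ≤ c + dir.2 ∧ c + dir.2 < ncol) ∧
        ¬ pvGet2 dist (r + dir.1) (c + dir.2) > 0 ∧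
        a = (max d (pvGet2 grid (r + dir.1) (c + dir.2) + 1), r + dir.1, c + dir.2) := by
  intro dirs
  induction dirs with
  | nil => intro h a ha; exact Or.inl ha
  | cons dir dirs ih =>
    intro h a ha
    simp only [List.foldl_cons] at ha
    rcases ih ha with h1 | ⟨dir', hdir', hprop⟩
    · rw [pvPushA_eq] at h1
      split at h1
      · rename_i hginb
        split at h1
        · exact Or.inl h1
        · rename_i hgun
          rcases List.mem_append.mp h1 with h2 | h2
          · exact Or.inl h2
          · simp only [List.mem_singleton] at h2
            exact Or.inr ⟨dir, by simp, hginb, hgun, h2⟩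
      · exact Or.inl h1
    · exact Or.inr ⟨dir', List.mem_cons_of_mem _ hdir', hprop⟩

lemma pvFoldPush_pushed {grid : List (List Int)} {nrow ncol d r c : Int} {dist : List (List Int)} :
    ∀ {dirs : List (Int × Int)} (h : List (Int × Int × Int)) {dir : Int × Int}, dir ∈ dirs →
      (0 ≤ r + dir.1 ∧ r + dir.1 < nrow ∧ 0 ≤ c + dir.2 ∧ c + dir.2 < ncol) →
      ¬ pvGet2 dist (r + dir.1) (c + dir.2) > 0 →
      (max d (pvGet2 grid (r + dir.1) (c + dir.2) + 1), r + dir.1, c + dir.2)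
        ∈ dirs.foldl (pvPushA grid nrow ncol d r c dist) h := by
  intro dirs
  induction dirs with
  | nil => intro h dir hdir; simp at hdir
  | cons dir0 dirs ih =>
    intro h dir hdir hin hun
    simp only [List.foldl_cons]
    rcases List.mem_cons.mp hdir with rfl | hdir'
    · apply pvFoldPush_mono
      rw [pvPushA_eq, if_pos hin, if_neg hun]
      simp
    · exact ih _ hdir' hin hun

-- ===== adjacency and the direction list =====
lemma pvAdj_of_dir {r c : Int} {dir : Int × Int} (hdir : dir ∈ pvDirs) :
    pvAdj (r, c) (r + dir.1, c + dir.2) := by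
  simp only [pvDirs, List.mem_cons, List.not_mem_nil, or_false] at hdir
  unfold pvAdj
  rcases hdir with rfl | rfl | rfl | rfl <;> simp

lemma pvAdj_dir_exists {u v : Int × Int} (h : pvAdj u v) :
    ∃ dir ∈ pvDirs, v.1 = u.1 + dir.1 ∧ v.2 = u.2 + dir.2 := by
  rcases h with ⟨h1, h2⟩ | ⟨h1, h2⟩ | ⟨h1, h2⟩ | ⟨h1, h2⟩
  · exact ⟨(-1, 0), by simp [pvDirs], by simp; omega, by simp; omega⟩
  · exact ⟨(1, 0), by simp [pvDirs], by simp; omega, by simp; omega⟩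
  · exact ⟨(0, -1), by simp [pvDirs], by simp; omega, by simp; omega⟩
  · exact ⟨(0, 1), by simp [pvDirs], by simp; omega, by simp; omega⟩

-- ===== Source B's near list and min =====
lemma pvNear_mem {nrow ncol r c : Int} {dist : List (List Int)} {x : Int} :
    x ∈ pvNear nrow ncol r c dist ↔
      ∃ u : Int × Int, pvAdj u (r, c) ∧ pvInb nrow ncol u.1 u.2 ∧
        1 ≤ pvGet2 dist u.1 u.2 ∧ x = pvGet2 dist u.1 u.2 := by
  unfold pvNear
  rw [List.mem_filterMap]
  constructor
  · rintro ⟨p, hp, hif⟩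
    split at hif
    · rename_i hcond
      injection hif with hif
      refine ⟨p, ?_, ⟨hcond.1, hcond.2.1, hcond.2.2.1, hcond.2.2.2.1⟩, by omega, hif.symm⟩
      simp only [List.mem_cons, List.not_mem_nil, or_false] at hp
      unfold pvAdj
      rcases hp with rfl | rfl | rfl | rfl
      · right; left; simp
      · left; simp
      · right; right; right; simp
      · right; right; left; simp
    · cases hif
  · rintro ⟨u, hadj, hin, h1, rfl⟩
    refine ⟨u, ?_, ?_⟩
    · obtain ⟨u1, u2⟩ := u
      unfold pvAdj at hadj
      simp only at hadj
      simp only [List.mem_cons, List.not_mem_nil, or_false, Prod.mk.injEq]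
      rcases hadj with ⟨h1', h2'⟩ | ⟨h1', h2'⟩ | ⟨h1', h2'⟩ | ⟨h1', h2'⟩
      · right; left; omega
      · left; omega
      · right; right; right; omega
      · right; right; left; omega
    · rw [if_pos ⟨hin.1, hin.2.1, hin.2.2.1, hin.2.2.2, by omega⟩]

lemma pvFoldlMin_mem : ∀ (xs : List Int) (x : Int), xs.foldl min x ∈ x :: xs := by
  intro xs
  induction xs with
  | nil => intro x; simp
  | cons z zs ih =>
    intro x
    simp only [List.foldl_cons]
    rcases List.mem_cons.mp (ih (min x z)) with h | h
    · rw [h]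
      rcases min_choice x z with h' | h' <;> rw [h'] <;> simp
    · simp [h]

lemma pvFoldlMin_le : ∀ (xs : List Int) (x : Int), ∀ y ∈ x :: xs, xs.foldl min x ≤ y := by
  intro xs
  induction xs with
  | nil =>
    intro x y hy
    simp only [List.mem_cons, List.not_mem_nil, or_false] at hy
    subst hy
    simp
  | cons z zs ih =>
    intro x y hy
    simp only [List.foldl_cons]
    have hmm := ih (min x z) (min x z) (by simp)
    simp only [List.mem_cons] at hy
    rcases hy with h | h | h
    · rw [h]; exact le_trans (hmm) (min_le_left x z)
    · rw [h]; exact le_trans (hmm) (min_le_right x z)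
    · exact ih (min x z) y (by simp [h])

-- ===== candidates: facts linking pvCand? to the heap invariant =====
lemma pvCand_cell {grid dist : List (List Int)} {nrow ncol r c : Int} {t : Int × Int × Int}
    (h : pvCand? grid dist nrow ncol r c = some t) :
    t.2.1 = r ∧ t.2.2 = c ∧ pvGet2 dist r c ≤ 0 := by
  unfold pvCand? at h
  split at h
  · cases h
  · rename_i hnot
    split at h
    · cases h
    · injection h with h
      rw [← h]
      exact ⟨rfl, rfl, by omega⟩

-- every candidate tuple is a live heap entry
lemma pvCand_mem_heap {grid dist : List (List Int)} {nrow ncol r c : Int}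
    {H : List (Int × Int × Int)} {t : Int × Int × Int}
    (hI : pvInv nrow ncol grid H dist) (hv : pvVals nrow ncol dist)
    (hin : pvInb nrow ncol r c) (h : pvCand? grid dist nrow ncol r c = some t) :
    t ∈ H := by
  unfold pvCand? at h
  split at h
  · cases h
  · rename_i hnot
    have h0 : pvGet2 dist r c = 0 := by
      rcases hv r c hin with h' | h' <;> omega
    cases hnear : pvNear nrow ncol r c dist with
    | nil => rw [hnear] at h; cases h
    | cons x xs =>
      rw [hnear] at h
      injection h with h
      have hmm : xs.foldl min x ∈ pvNear nrow ncol r c dist := by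
        rw [hnear]; exact pvFoldlMin_mem xs x
      rw [pvNear_mem] at hmm
      obtain ⟨u, hadj, huin, hu1, hux⟩ := hmm
      have := hI.2 (r, c) hin h0 u hadj huin hu1
      rw [← h, hux]
      exact this

-- a fresh heap minimum is exactly the candidate of its own cell
lemma pvHeapMin_cand {grid dist : List (List Int)} {nrow ncol : Int}
    {H : List (Int × Int × Int)} {m : Int × Int × Int}
    (hI : pvInv nrow ncol grid H dist)
    (hmem : m ∈ H) (hmin : ∀ y ∈ H, pvLexLt y m = false)
    (h0 : pvGet2 dist m.2.1 m.2.2 = 0) :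
    pvCand? grid dist nrow ncol m.2.1 m.2.2 = some m := by
  obtain ⟨hinb, hd1, hwit⟩ := hI.1 m hmem
  rcases hwit with h' | hw
  · omega
  · obtain ⟨u, hadj, huin, hu1, hub⟩ := hw
    have hmemnear : pvGet2 dist u.1 u.2 ∈ pvNear nrow ncol m.2.1 m.2.2 dist :=
      pvNear_mem.mpr ⟨u, hadj, huin, hu1, rfl⟩
    unfold pvCand?
    rw [if_neg (by omega)]
    cases hnear : pvNear nrow ncol m.2.1 m.2.2 dist with
    | nil => rw [hnear] at hmemnear; cases hmemnear
    | cons x xs =>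
      have hminmem : xs.foldl min x ∈ pvNear nrow ncol m.2.1 m.2.2 dist := by
        rw [hnear]; exact pvFoldlMin_mem xs x
      rw [pvNear_mem] at hminmem
      obtain ⟨w, hwadj, hwin, hw1, hwx⟩ := hminmem
      have hkmem : (max (xs.foldl min x) (pvGet2 grid m.2.1 m.2.2 + 1), m.2.1, m.2.2) ∈ H := by
        rw [hwx]
        exact hI.2 (m.2.1, m.2.2) hinb h0 w hwadj hwin hw1
      have hkle : max (xs.foldl min x) (pvGet2 grid m.2.1 m.2.2 + 1) ≤ m.1 := by
        have hle : xs.foldl min x ≤ pvGet2 dist u.1 u.2 := by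
          rw [hnear] at hmemnear
          exact pvFoldlMin_le xs x _ hmemnear
        omega
      have hnl := hmin _ hkmem
      rw [← Bool.not_eq_true, pvLexLt_iff] at hnl
      simp only at hnl
      have hkeq : max (xs.foldl min x) (pvGet2 grid m.2.1 m.2.2 + 1) = m.1 := by omega
      show some (max (xs.foldl min x) (pvGet2 grid m.2.1 m.2.2 + 1), m.2.1, m.2.2) = some m
      rw [hkeq]

-- ===== the scan: flattening and its fold specification =====
def pvCells (nR nC : Nat) : List (Nat × Nat) :=
  (List.range nR).flatMap (fun r => (List.range nC).map (fun c => (r, c)))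

lemma pvScan_eq_foldl (grid dist : List (List Int)) (nrow ncol : Int) :
    pvScan grid dist nrow ncol =
      (pvCells nrow.toNat ncol.toNat).foldl (pvPick grid dist nrow ncol) none := by
  unfold pvScan pvCells
  rw [List.foldl_flatMap]
  congr 1
  funext acc r
  rw [List.foldl_map]

lemma pv_mem_pvCells {nR nC : Nat} {p : Nat × Nat} :
    p ∈ pvCells nR nC ↔ p.1 < nR ∧ p.2 < nC := by
  obtain ⟨a, b⟩ := p
  simp [pvCells, List.mem_flatMap]

def pvCellLt (p q : Nat × Nat) : Prop := p.1 < q.1 ∨ (p.1 = q.1 ∧ p.2 < q.2)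

lemma pvCells_pairwise (nR nC : Nat) : (pvCells nR nC).Pairwise pvCellLt := by
  induction nR with
  | zero => simp [pvCells]
  | succ n ih =>
    unfold pvCells
    rw [List.range_succ, List.flatMap_append]
    apply List.pairwise_append.mpr
    refine ⟨ih, ?_, ?_⟩
    · simp only [List.flatMap_singleton]
      rw [List.pairwise_map]
      apply List.Pairwise.imp (fun {a b} h => ?_) (List.pairwise_lt_range)
      exact Or.inr ⟨rfl, h⟩
    · intro a ha b hb
      have ha' : a.1 < n := (pv_mem_pvCells.mp ha).1
      have hb' : b.1 = n := by
        simp only [List.flatMap_singleton, List.mem_map] at hb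
        obtain ⟨c, _, rfl⟩ := hb
        rfl
      exact Or.inl (by omega)

lemma pvLexLt_false_key {t s : Int × Int × Int} (h : pvLexLt t s = false) : s.1 ≤ t.1 := by
  rw [← Bool.not_eq_true, pvLexLt_iff] at h
  omega

-- the scan fold computes the lexicographic minimum of all candidates
lemma pvScanGo (grid dist : List (List Int)) (nrow ncol : Int) :
    ∀ (L : List (Nat × Nat)) (acc : Option (Int × Int × Int)),
      L.Pairwise pvCellLt →
      (∀ a, acc = some a → ∀ p ∈ L,
        a.2.1 < (p.1 : Int) ∨ (a.2.1 = (p.1 : Int) ∧ a.2.2 < (p.2 : Int))) →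
      (∀ s, L.foldl (pvPick grid dist nrow ncol) acc = some s →
        ((acc = some s ∨ ∃ p ∈ L, pvCand? grid dist nrow ncol (p.1 : Int) (p.2 : Int) = some s) ∧
         (∀ a, acc = some a → pvLexLt a s = false) ∧
         (∀ p ∈ L, ∀ t, pvCand? grid dist nrow ncol (p.1 : Int) (p.2 : Int) = some t →
            pvLexLt t s = false))) ∧
      (L.foldl (pvPick grid dist nrow ncol) acc = none →
        acc = none ∧ ∀ p ∈ L, pvCand? grid dist nrow ncol (p.1 : Int) (p.2 : Int) = none) := by
  intro L
  induction L with
  | nil =>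
    intro acc _ _
    constructor
    · intro s hs
      refine ⟨Or.inl hs, ?_, by simp⟩
      intro a ha
      rw [ha] at hs
      injection hs with hs
      rw [hs]
      exact pvLexLt_irrefl _
    · intro h
      exact ⟨h, by simp⟩
  | cons p L ih =>
    intro acc hpw hacc
    have hpw' := List.Pairwise.of_cons hpw
    have hpL : ∀ q ∈ L, pvCellLt p q := (List.pairwise_cons.mp hpw).1
    simp only [List.foldl_cons]
    cases hc : pvCand? grid dist nrow ncol (p.1 : Int) (p.2 : Int) with
    | none =>
      have hstep : pvPick grid dist nrow ncol acc p = acc := by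
        unfold pvPick; rw [hc]
      rw [hstep]
      obtain ⟨ihs, ihn⟩ := ih acc hpw' (fun a ha q hq => hacc a ha q (List.mem_cons_of_mem _ hq))
      constructor
      · intro s hs
        obtain ⟨hsrc, hold, hcands⟩ := ihs s hs
        refine ⟨?_, hold, ?_⟩
        · rcases hsrc with h | ⟨q, hq, hcq⟩
          · exact Or.inl h
          · exact Or.inr ⟨q, List.mem_cons_of_mem _ hq, hcq⟩
        · intro q hq t ht
          rcases List.mem_cons.mp hq with rfl | hq'
          · rw [hc] at ht; cases ht
          · exact hcands q hq' t ht
      · intro h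
        obtain ⟨h1, h2⟩ := ihn h
        refine ⟨h1, fun q hq => ?_⟩
        rcases List.mem_cons.mp hq with rfl | hq'
        · exact hc
        · exact h2 q hq'
    | some t =>
      have htc := pvCand_cell hc
      have htcell1 : t.2.1 = (p.1 : Int) := htc.1
      have htcell2 : t.2.2 = (p.2 : Int) := htc.2.1
      cases hA : acc with
      | none =>
        have hstep : pvPick grid dist nrow ncol none p = some t := by
          unfold pvPick; rw [hc]
        rw [hstep]
        have hacc' : ∀ a, (some t : Option (Int × Int × Int)) = some a → ∀ q ∈ L,
            a.2.1 < (q.1 : Int) ∨ (a.2.1 = (q.1 : Int) ∧ a.2.2 < (q.2 : Int)) := by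
          intro a ha q hq
          injection ha with ha; subst ha
          rcases hpL q hq with h | ⟨h1, h2⟩
          · left; rw [htcell1]; exact_mod_cast h
          · right
            rw [htcell1, htcell2]
            exact ⟨by exact_mod_cast h1, by exact_mod_cast h2⟩
        obtain ⟨ihs, ihn⟩ := ih (some t) hpw' hacc'
        constructor
        · intro s hs
          obtain ⟨hsrc, hold, hcands⟩ := ihs s hs
          refine ⟨?_, ?_, ?_⟩
          · rcases hsrc with h | ⟨q, hq, hcq⟩
            · injection h with h
              exact Or.inr ⟨p, by simp, h ▸ hc⟩
            · exact Or.inr ⟨q, List.mem_cons_of_mem _ hq, hcq⟩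
          · intro a ha; cases ha
          · intro q hq t' ht'
            rcases List.mem_cons.mp hq with rfl | hq'
            · rw [hc] at ht'; injection ht' with ht'; subst ht'
              exact hold t rfl
            · exact hcands q hq' t' ht'
        · intro h
          obtain ⟨h1, _⟩ := ihn h
          cases h1
      | some b =>
        by_cases hlt : t.1 < b.1
        · have hstep : pvPick grid dist nrow ncol (some b) p = some t := by
            simp [pvPick, hc, hlt]
          rw [hstep]
          have hacc' : ∀ a, (some t : Option (Int × Int × Int)) = some a → ∀ q ∈ L,
              a.2.1 < (q.1 : Int) ∨ (a.2.1 = (q.1 : Int) ∧ a.2.2 < (q.2 : Int)) := by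
            intro a ha q hq
            injection ha with ha; subst ha
            rcases hpL q hq with h | ⟨h1, h2⟩
            · left; rw [htcell1]; exact_mod_cast h
            · right
              rw [htcell1, htcell2]
              exact ⟨by exact_mod_cast h1, by exact_mod_cast h2⟩
          obtain ⟨ihs, ihn⟩ := ih (some t) hpw' hacc'
          constructor
          · intro s hs
            obtain ⟨hsrc, hold, hcands⟩ := ihs s hs
            have hts : pvLexLt t s = false := hold t rfl
            refine ⟨?_, ?_, ?_⟩
            · rcases hsrc with h | ⟨q, hq, hcq⟩
              · injection h with h
                exact Or.inr ⟨p, by simp, h ▸ hc⟩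
              · exact Or.inr ⟨q, List.mem_cons_of_mem _ hq, hcq⟩
            · intro a ha
              injection ha with ha; subst ha
              have hsk : s.1 ≤ t.1 := pvLexLt_false_key hts
              rw [← Bool.not_eq_true, pvLexLt_iff]
              omega
            · intro q hq t' ht'
              rcases List.mem_cons.mp hq with rfl | hq'
              · rw [hc] at ht'; injection ht' with ht'; subst ht'
                exact hts
              · exact hcands q hq' t' ht'
          · intro h
            obtain ⟨h1, _⟩ := ihn h
            cases h1
        · have hstep : pvPick grid dist nrow ncol (some b) p = some b := by
            simp [pvPick, hc, hlt]
          rw [hstep, ← hA]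
          obtain ⟨ihs, ihn⟩ := ih acc hpw'
            (fun a ha q hq => hacc a ha q (List.mem_cons_of_mem _ hq))
          constructor
          · intro s hs
            obtain ⟨hsrc, hold, hcands⟩ := ihs s hs
            have hbs : pvLexLt b s = false := hold b hA
            refine ⟨?_, hold, ?_⟩
            · rcases hsrc with h | ⟨q, hq, hcq⟩
              · exact Or.inl h
              · exact Or.inr ⟨q, List.mem_cons_of_mem _ hq, hcq⟩
            · intro q hq t' ht'
              rcases List.mem_cons.mp hq with rfl | hq'
              · rw [hc] at ht'; injection ht' with ht'; subst ht'
                -- b survived (t.1 ≥ b.1 ≥ s.1); on key ties s's cell precedes t's cell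
                rw [← Bool.not_eq_true, pvLexLt_iff]
                intro hcon
                rw [← Bool.not_eq_true, pvLexLt_iff] at hbs
                have hbp := hacc b hA q (by simp)
                rw [htcell1, htcell2] at hcon
                omega
              · exact hcands q hq' t' ht'
          · intro h
            obtain ⟨h1, _⟩ := ihn h
            rw [hA] at h1; cases h1

-- the scan agrees with A's fresh heap minimum
lemma pvScan_eq_min {grid dist : List (List Int)} {nrow ncol : Int}
    {H : List (Int × Int × Int)} {m : Int × Int × Int}
    (hI : pvInv nrow ncol grid H dist) (hv : pvVals nrow ncol dist)
    (hmem : m ∈ H) (hmin : ∀ y ∈ H, pvLexLt y m = false)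
    (h0 : pvGet2 dist m.2.1 m.2.2 = 0) :
    pvScan grid dist nrow ncol = some m := by
  have hinb : pvInb nrow ncol m.2.1 m.2.2 := (hI.1 m hmem).1
  have hcand := pvHeapMin_cand hI hmem hmin h0
  have hp : ((m.2.1.toNat, m.2.2.toNat) : Nat × Nat) ∈ pvCells nrow.toNat ncol.toNat := by
    rw [pv_mem_pvCells]
    obtain ⟨h1, h2, h3, h4⟩ := hinb
    constructor <;> omega
  have hcast1 : ((m.2.1.toNat : Int)) = m.2.1 := by
    obtain ⟨h1, _, _, _⟩ := hinb; omega
  have hcast2 : ((m.2.2.toNat : Int)) = m.2.2 := by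
    obtain ⟨_, _, h3, _⟩ := hinb; omega
  have hcand' : pvCand? grid dist nrow ncol ((m.2.1.toNat : Int)) ((m.2.2.toNat : Int)) = some m := by
    rw [hcast1, hcast2]; exact hcand
  rw [pvScan_eq_foldl]
  obtain ⟨hs, hn⟩ := pvScanGo grid dist nrow ncol (pvCells nrow.toNat ncol.toNat) none
    (pvCells_pairwise _ _) (by intro a ha; cases ha)
  cases hres : (pvCells nrow.toNat ncol.toNat).foldl (pvPick grid dist nrow ncol) none with
  | none =>
    obtain ⟨_, hall⟩ := hn hres
    rw [hall _ hp] at hcand'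
    cases hcand'
  | some s =>
    obtain ⟨hsrc, _, hcands⟩ := hs s hres
    have hsH : s ∈ H := by
      rcases hsrc with h | ⟨q, hq, hcq⟩
      · cases h
      · have hq' := pv_mem_pvCells.mp hq
        have hqin : pvInb nrow ncol (q.1 : Int) (q.2 : Int) := by
          obtain ⟨hq1, hq2⟩ := hq'
          exact ⟨by positivity, by omega, by positivity, by omega⟩
        exact pvCand_mem_heap hI hv hqin hcq
    have h1 : pvLexLt s m = false := hmin s hsH
    have h2 : pvLexLt m s = false := hcands _ hp m hcand'
    rw [pvLexLt_antisymm h1 h2]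

-- ===== invariant preservation =====
-- the invariant is (re-)established after assigning cell (r, c) value d and pushing
-- relaxations to its unassigned neighbours; H₀ is the heap before the pushes, required
-- to carry the invariant facts w.r.t. the OLD matrix (this covers both A's initial
-- state, H₀ = [], and the erased heap after a fresh pop).
lemma pvInv_establish (grid : List (List Int)) (nrow ncol d r c : Int)
    (dist : List (List Int)) (H₀ : List (Int × Int × Int))
    (hsh : pvShape nrow ncol dist) (hin : pvInb nrow ncol r c)
    (h0 : pvGet2 dist r c = 0) (hd : 1 ≤ d)
    (h1 : ∀ e ∈ H₀, pvInb nrow ncol e.2.1 e.2.2 ∧ 1 ≤ e.1 ∧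
       (1 ≤ pvGet2 dist e.2.1 e.2.2 ∨
        ∃ u : Int × Int, pvAdj u (e.2.1, e.2.2) ∧ pvInb nrow ncol u.1 u.2 ∧
          1 ≤ pvGet2 dist u.1 u.2 ∧
          max (pvGet2 dist u.1 u.2) (pvGet2 grid e.2.1 e.2.2 + 1) ≤ e.1))
    (h2 : ∀ v : Int × Int, pvInb nrow ncol v.1 v.2 → pvGet2 dist v.1 v.2 = 0 →
       ¬ (v.1 = r ∧ v.2 = c) →
       ∀ u : Int × Int, pvAdj u v → pvInb nrow ncol u.1 u.2 → 1 ≤ pvGet2 dist u.1 u.2 →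
         (max (pvGet2 dist u.1 u.2) (pvGet2 grid v.1 v.2 + 1), v.1, v.2) ∈ H₀) :
    pvInv nrow ncol grid
      (pvDirs.foldl (pvPushA grid nrow ncol d r c (pvSet2 dist r c d)) H₀)
      (pvSet2 dist r c d) := by
  have hself : pvGet2 (pvSet2 dist r c d) r c = d := pvGet2_set2_self hsh hin
  have hne : ∀ {r' c' : Int}, pvInb nrow ncol r' c' → ¬ (r' = r ∧ c' = c) →
      pvGet2 (pvSet2 dist r c d) r' c' = pvGet2 dist r' c' :=
    fun hin' h => pvGet2_set2_ne hsh hin hin' h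
  constructor
  · intro e he
    rcases pvFoldPush_sub he with heH | ⟨dir, hdir, hbin, hun, heq⟩
    · obtain ⟨hein, he1, hwit⟩ := h1 e heH
      refine ⟨hein, he1, ?_⟩
      by_cases hc : e.2.1 = r ∧ e.2.2 = c
      · left; rw [hc.1, hc.2, hself]; omega
      · rw [hne hein hc]
        rcases hwit with h' | ⟨u, hadj, huin, hu1, hub⟩
        · exact Or.inl h'
        · by_cases hu : u.1 = r ∧ u.2 = c
          · exfalso; rw [hu.1, hu.2] at hu1; omega
          · right
            exact ⟨u, hadj, huin, by rw [hne huin hu]; exact hu1, by rw [hne huin hu]; exact hub⟩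
    · subst heq
      refine ⟨⟨hbin.1, hbin.2.1, hbin.2.2.1, hbin.2.2.2⟩, by simp; omega, Or.inr ?_⟩
      exact ⟨(r, c), pvAdj_of_dir hdir, hin, by rw [hself]; omega, by rw [hself]⟩
  · intro v hvin hv0 u hadj huin hu1
    have hvne : ¬ (v.1 = r ∧ v.2 = c) := by
      intro hcon
      rw [hcon.1, hcon.2, hself] at hv0
      omega
    by_cases hu : u.1 = r ∧ u.2 = c
    · -- relaxation through the newly assigned cell: it was just pushed
      obtain ⟨dir, hdir, hv1, hv2⟩ := pvAdj_dir_exists hadj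
      rw [hu.1] at hv1
      rw [hu.2] at hv2
      have hpush := pvFoldPush_pushed (grid := grid) (nrow := nrow) (ncol := ncol) (d := d)
        (r := r) (c := c) (dist := pvSet2 dist r c d) H₀ hdir
        (by rw [← hv1, ← hv2]; exact ⟨hvin.1, hvin.2.1, hvin.2.2.1, hvin.2.2.2⟩)
        (by rw [← hv1, ← hv2]; omega)
      rw [← hv1, ← hv2] at hpush
      rw [hu.1, hu.2, hself]
      exact hpush
    · have hu1' : 1 ≤ pvGet2 dist u.1 u.2 := by rw [← hne huin hu]; exact hu1
      have hv0' : pvGet2 dist v.1 v.2 = 0 := by rw [← hne hvin hvne]; exact hv0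
      have hmem := h2 v hvin hv0' hvne u hadj huin hu1'
      rw [hne huin hu]
      exact pvFoldPush_mono hmem

-- a stale pop (A only) keeps the invariant
lemma pvInv_stale {nrow ncol : Int} {grid : List (List Int)} {H : List (Int × Int × Int)}
    {dist : List (List Int)} {m : Int × Int × Int}
    (hI : pvInv nrow ncol grid H dist) (hass : 1 ≤ pvGet2 dist m.2.1 m.2.2) :
    pvInv nrow ncol grid (pvEraseFirst H m) dist := by
  obtain ⟨h1, h2⟩ := hI
  constructor
  · intro e he
    exact h1 e (pvEraseFirst_subset he)
  · intro v hvin hv0 u hadj huin hu1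
    apply pvEraseFirst_mem_of_ne (h2 v hvin hv0 u hadj huin hu1)
    intro hcon
    have hvv : v.1 = m.2.1 ∧ v.2 = m.2.2 := by
      have h := congrArg (fun t => t.2) hcon
      exact ⟨congrArg Prod.fst h, congrArg Prod.snd h⟩
    rw [hvv.1, hvv.2] at hv0
    omega

-- with an empty heap there is no candidate, so B's scan stops too
lemma pvScan_none_of_empty {grid dist : List (List Int)} {nrow ncol : Int}
    (hI : pvInv nrow ncol grid [] dist) (hv : pvVals nrow ncol dist) :
    pvScan grid dist nrow ncol = none := by
  rw [pvScan_eq_foldl]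
  cases hres : (pvCells nrow.toNat ncol.toNat).foldl (pvPick grid dist nrow ncol) none with
  | none => rfl
  | some s =>
    exfalso
    obtain ⟨hs, _⟩ := pvScanGo grid dist nrow ncol (pvCells nrow.toNat ncol.toNat) none
      (pvCells_pairwise _ _) (by intro a ha; cases ha)
    obtain ⟨hsrc, _, _⟩ := hs s hres
    rcases hsrc with h | ⟨q, hq, hcq⟩
    · cases h
    · have hq' := pv_mem_pvCells.mp hq
      have hqin : pvInb nrow ncol (q.1 : Int) (q.2 : Int) := by
          obtain ⟨hq1, hq2⟩ := hq'
          exact ⟨by positivity, by omega, by positivity, by omega⟩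
      exact absurd (pvCand_mem_heap hI hv hqin hcq) (by simp)

-- ===== the simulation =====
lemma pvSim (grid : List (List Int)) (nrow ncol : Int) :
    ∀ (fA : Nat) (H : List (Int × Int × Int)) (dist : List (List Int)) (mv : Int) (fB : Nat),
      pvShape nrow ncol dist → pvVals nrow ncol dist → pvInv nrow ncol grid H dist →
      H.length + 5 * pvUc nrow ncol dist ≤ fA →
      pvUc nrow ncol dist ≤ fB →
      pvLoopA grid nrow ncol fA H dist mv = pvLoopAlt grid nrow ncol fB dist mv := by
  intro fA
  induction fA with
  | zero =>
    intro H dist mv fB hsh hv hI hA hB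
    have hH : H = [] := by
      cases H with
      | nil => rfl
      | cons a b => exfalso; simp only [List.length_cons] at hA; omega
    subst hH
    have hscan := pvScan_none_of_empty hI hv
    cases fB with
    | zero => rfl
    | succ g => simp [pvLoopA, pvLoopAlt, hscan]
  | succ f ih =>
    intro H dist mv fB hsh hv hI hA hB
    cases H with
    | nil =>
      have hscan := pvScan_none_of_empty hI hv
      cases fB with
      | zero => simp [pvLoopA, pvLoopAlt]
      | succ g => simp [pvLoopA, pvLoopAlt, hscan]
    | cons x xs =>
      simp only [pvLoopA]
      set m := pvFoldMin pvLexLt x xs with hm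
      clear_value m
      have hmmem : m ∈ x :: xs := by rw [hm]; exact pvFoldMin_mem _ _ _
      obtain ⟨hminb, hmd, -⟩ := hI.1 m hmmem
      have hmmin : ∀ y ∈ x :: xs, pvLexLt y m = false := by
        rw [hm]; exact pvLexLt_min x xs
      rcases hv m.2.1 m.2.2 hminb with h0 | h1
      · -- fresh pop: B's scan picks the same cell with the same key
        rw [if_neg (by omega)]
        have hUc1 : 1 ≤ pvUc nrow ncol dist := pvUc_pos hminb h0
        cases fB with
        | zero => omega
        | succ g =>
          have hscan : pvScan grid dist nrow ncol = some m :=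
            pvScan_eq_min hI hv hmmem hmmin h0
          rw [show pvLoopAlt grid nrow ncol (g + 1) dist mv =
              pvLoopAlt grid nrow ncol g (pvSet2 dist m.2.1 m.2.2 m.1) (max mv m.1) from by
            simp only [pvLoopAlt, hscan]]
          have hsh' := pvShape_set2 hsh hminb (v := m.1)
          have hv' := pvVals_set2 hsh hv hminb hmd
          have hI' : pvInv nrow ncol grid
              (pvDirs.foldl (pvPushA grid nrow ncol m.1 m.2.1 m.2.2
                (pvSet2 dist m.2.1 m.2.2 m.1)) (pvEraseFirst (x :: xs) m))
              (pvSet2 dist m.2.1 m.2.2 m.1) := by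
            apply pvInv_establish grid nrow ncol m.1 m.2.1 m.2.2 dist _ hsh hminb h0 hmd
            · intro e he
              exact hI.1 e (pvEraseFirst_subset he)
            · intro v hvin hv0 hvne u hadj huin hu1
              apply pvEraseFirst_mem_of_ne (hI.2 v hvin hv0 u hadj huin hu1)
              intro hcon
              have hvv : v.1 = m.2.1 ∧ v.2 = m.2.2 := by
                have h := congrArg (fun t => t.2) hcon
                exact ⟨congrArg Prod.fst h, congrArg Prod.snd h⟩
              exact hvne hvv
          have huc := pvUc_set2 hsh hminb h0 hmd
          have hlenE := pvEraseFirst_length hmmem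
          have hfoldA := pvFoldPush_length_le grid nrow ncol m.1 m.2.1 m.2.2
            (pvSet2 dist m.2.1 m.2.2 m.1) pvDirs (pvEraseFirst (x :: xs) m)
          have hdirs4 : pvDirs.length = 4 := rfl
          have hxxs : (x :: xs).length = xs.length + 1 := List.length_cons
          apply ih _ _ _ g hsh' hv' hI'
          · revert hfoldA hlenE huc hA hB hdirs4
            omega
          · revert huc hB
            omega
      · -- stale pop: A drops the entry, B does nothing
        rw [if_pos (by omega)]
        have hI' := pvInv_stale hI h1
        have hlenE := pvEraseFirst_length hmmem
        have hxxs : (x :: xs).length = xs.length + 1 := List.length_cons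
        apply ih _ _ _ fB hsh hv hI'
        · omega
        · exact hB

-- all-zero initial matrix facts
lemma pvGet2_zeros (R C : Nat) (r c : Int) :
    pvGet2 (List.replicate R (List.replicate C (0 : Int))) r c = 0 := by
  unfold pvGet2
  rcases Nat.lt_or_ge r.toNat R with h | h
  · rw [List.getD_eq_getElem (List.replicate R (List.replicate C (0 : Int))) []
        (by simpa using h), List.getElem_replicate]
    rcases Nat.lt_or_ge c.toNat C with h2 | h2
    · rw [List.getD_eq_getElem (List.replicate C (0 : Int)) 0 (by simpa using h2),
        List.getElem_replicate]
    · rw [List.getD_eq_default (List.replicate C (0 : Int)) 0 (by simpa using h2)]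
  · rw [List.getD_eq_default (List.replicate R (List.replicate C (0 : Int))) []
        (by simpa using h)]
    rfl

lemma pvUc_zeros (nrow ncol : Int) :
    pvUc nrow ncol (List.replicate nrow.toNat (List.replicate ncol.toNat (0 : Int))) =
      nrow.toNat * ncol.toNat := by
  unfold pvUc
  rw [List.countP_eq_length.mpr]
  · rw [List.length_product, PySem.List.length_pyRange_one, PySem.List.length_pyRange_one]
    simp
  · intro p hp
    simp [pvGet2_zeros]

-- ===== VERDICT =====
theorem solveDistsInGrid_spec : Claim_equal_solveDistsInGrid := by
  unfold Claim_equal_solveDistsInGrid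
  intro grid _ hpre
  obtain ⟨hne, hcol, hrows, h00⟩ := hpre
  unfold Spec_solveDistsInGrid solveDistsInGrid solveDistsInGrid_alt
  simp only [PySem.List.pyGetD_zero]
  have hlen0 : 0 < grid.length := List.length_pos_iff.mpr hne
  set nrow : Int := (grid.length : Int) with hnrow
  set ncol : Int := ((grid.getD 0 []).length : Int) with hncol
  have haux : ∀ {α : Type} (a : α) (n : Nat),
      (List.range n).map (fun _ => a) = List.replicate n a := by
    intro α a n
    induction n with
    | zero => rfl
    | succ k ihn => rw [List.range_succ, List.map_append, ihn, List.replicate_succ']; rfl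
  simp only [haux]
  have hg00 : pvGet2 grid 0 0 = (grid.headD []).headD 0 := by
    cases grid with
    | nil => rfl
    | cons row rest =>
      cases row with
      | nil => rfl
      | cons a as => rfl
  have hhead : grid.getD 0 [] = grid.headD [] := by cases grid <;> rfl
  have hnrowpos : 0 < nrow := by rw [hnrow]; exact_mod_cast hlen0
  have hncolpos : 0 < ncol := by rw [hncol, hhead]; exact_mod_cast hcol
  have hin00 : pvInb nrow ncol 0 0 := by unfold pvInb; omega
  have hd00 : 1 ≤ pvGet2 grid 0 0 + 1 := by rw [hg00]; omega
  set Z : List (List Int) := List.replicate nrow.toNat (List.replicate ncol.toNat (0 : Int))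
    with hZ
  have hsh0 : pvShape nrow ncol Z := by
    constructor
    · simp [hZ]
    · intro row hrow
      rw [List.eq_of_mem_replicate hrow]
      simp
  have hv0 : pvVals nrow ncol Z := by
    intro r c _
    left
    exact pvGet2_zeros _ _ _ _
  -- unfold A's first iteration by hand
  have hfuel : 1 + 5 * (nrow.toNat * ncol.toNat) = 5 * (nrow.toNat * ncol.toNat) + 1 := by
    omega
  rw [hfuel]
  have hZ00 : pvGet2 Z 0 0 = 0 := pvGet2_zeros _ _ _ _
  have hstep : pvLoopA grid nrow ncol (5 * (nrow.toNat * ncol.toNat) + 1)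
      [(pvGet2 grid 0 0 + 1, 0, 0)] Z 0 =
      pvLoopA grid nrow ncol (5 * (nrow.toNat * ncol.toNat))
        (pvDirs.foldl (pvPushA grid nrow ncol (pvGet2 grid 0 0 + 1) 0 0
          (pvSet2 Z 0 0 (pvGet2 grid 0 0 + 1))) [])
        (pvSet2 Z 0 0 (pvGet2 grid 0 0 + 1)) (max 0 (pvGet2 grid 0 0 + 1)) := by
    have herase : pvEraseFirst [(pvGet2 grid 0 0 + 1, (0 : Int), (0 : Int))]
        (pvGet2 grid 0 0 + 1, (0 : Int), (0 : Int)) = [] := by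
      unfold pvEraseFirst
      rw [if_pos rfl]
    simp only [pvLoopA, pvFoldMin, List.foldl_nil, herase]
    rw [if_neg (by omega)]
  rw [hstep]
  have hmax : max 0 (pvGet2 grid 0 0 + 1) = pvGet2 grid 0 0 + 1 := by omega
  rw [hmax]
  have hI1 := pvInv_establish grid nrow ncol (pvGet2 grid 0 0 + 1) 0 0 Z []
    hsh0 hin00 hZ00 hd00
    (by intro e he; cases he)
    (by
      intro v hvin hv0 hvne u hadj huin hu1
      exfalso
      have hz : pvGet2 Z u.1 u.2 = 0 := pvGet2_zeros _ _ _ _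
      omega)
  have hsh1 := pvShape_set2 hsh0 hin00 (v := pvGet2 grid 0 0 + 1)
  have hv1 := pvVals_set2 hsh0 hv0 hin00 hd00
  have huc1 := pvUc_set2 hsh0 hin00 hZ00 hd00
  have hucZ := pvUc_zeros nrow ncol
  rw [← hZ] at hucZ
  have hfold := pvFoldPush_length_le grid nrow ncol (pvGet2 grid 0 0 + 1) 0 0
    (pvSet2 Z 0 0 (pvGet2 grid 0 0 + 1)) pvDirs []
  have hdirs4 : pvDirs.length = 4 := rfl
  have hnm1 : 1 ≤ nrow.toNat * ncol.toNat := by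
    have h1 : 1 ≤ nrow.toNat := by omega
    have h2 : 1 ≤ ncol.toNat := by omega
    exact Nat.one_le_iff_ne_zero.mpr (by positivity)
  apply pvSim grid nrow ncol _ _ _ _ _ hsh1 hv1 hI1
  · simp only [List.length_nil] at hfold
    omega
  · omega
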